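-- pv_equiv track=rewrite | github.com/Keeper-Security/Commander | keepercommander/commands/supershell/renderers/folder.py | count_share_admins
-- ===== SOURCE A (Python) =====
-- FOLDER_SECTION_HEADERS = {
--     'Record Permissions', 'User Permissions',
--     'Team Permissions', 'Share Administrators'
-- }
--
-- def count_share_admins(output: str) -> int:
--     """Count share admins in folder output.
--
--     Args:
--         output: Raw folder detail output
--
--     Returns:
--         Number of share admin users
--     """
--     count = 0
--     in_share_admins = False
--
--     for line in output.split('\n'):
--         stripped = line.strip()
--         if ':' in stripped:
--             key = stripped.split(':', 1)[0].strip()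
--             if key == 'Share Administrators':
--                 in_share_admins = True
--             elif key in FOLDER_SECTION_HEADERS and key != 'Share Administrators':
--                 in_share_admins = False
--             elif in_share_admins and key == 'User':
--                 count += 1
--
--     return count
-- ===== SOURCE B (Python) =====
-- FOLDER_SECTION_HEADERS = {
--     'Record Permissions', 'User Permissions',
--     'Team Permissions', 'Share Administrators'
-- }
--
--
-- def count_share_admins(output: str) -> int:
--     """Count share admins in folder output (table-then-query formulation)."""
--     buckets = {}
--     section = None
--     for line in output.split('\n'):
--         stripped = line.strip()
--         if ':' not in stripped:
--             continue
--         key = stripped.split(':', 1)[0].strip()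
--         if key in FOLDER_SECTION_HEADERS:
--             section = key
--         else:
--             buckets.setdefault(section, []).append(key)
--     return buckets.get('Share Administrators', []).count('User')
-- ===== Notes on version B (the rewrite author's own statement) =====
-- stated objective: alternative
-- what changed: Replaces the inline stateful in-section counter with a build-a-table pass (dict mapping current section header to the list of its keys) followed by a separate query counting 'User' entries in the 'Share Administrators' bucket.
import Mathlib
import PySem

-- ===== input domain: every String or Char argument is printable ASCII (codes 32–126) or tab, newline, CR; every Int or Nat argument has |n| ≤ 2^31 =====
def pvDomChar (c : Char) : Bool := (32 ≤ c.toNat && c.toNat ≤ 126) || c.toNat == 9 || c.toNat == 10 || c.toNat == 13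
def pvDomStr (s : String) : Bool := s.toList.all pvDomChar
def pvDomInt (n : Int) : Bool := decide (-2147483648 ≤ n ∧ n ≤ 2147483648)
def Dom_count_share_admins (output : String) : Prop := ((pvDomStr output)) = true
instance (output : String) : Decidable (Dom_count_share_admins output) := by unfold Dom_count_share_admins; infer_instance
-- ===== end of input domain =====

-- B builds a section → keys table in one pass and then queries the 'Share Administrators'
-- bucket, instead of A's inline stateful counter; same cost, different shape (objective: alternative).

-- shared by both ports: both Pythons compute `key = line.strip().split(':', 1)[0].strip()` identically
def csaKey (line : String) : String :=
  PySem.Str.strip (((PySem.Str.splitMax? (PySem.Str.strip line) ":" 1).getD []).headD "")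

-- ===== PORT A =====
def folderSectionHeaders : List String :=
  ["Record Permissions", "User Permissions", "Team Permissions", "Share Administrators"]

def csaStepA (st : Int × Bool) (line : String) : Int × Bool :=
  if PySem.Str.isIn ":" (PySem.Str.strip line) then
    let key := csaKey line
    if key == "Share Administrators" then (st.1, true)
    else if folderSectionHeaders.contains key && key != "Share Administrators" then (st.1, false)
    else if st.2 && key == "User" then (st.1 + 1, st.2)
    else st
  else st

def count_share_admins (output : String) : Int :=
  (((PySem.Str.split? output "\n").getD []).foldl csaStepA (0, false)).1

-- ===== PORT B =====
def csaStepB (st : PySem.Dict (Option String) (List String) × Option String) (line : String) :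
    PySem.Dict (Option String) (List String) × Option String :=
  if PySem.Str.isIn ":" (PySem.Str.strip line) then
    let key := csaKey line
    if folderSectionHeaders.contains key then (st.1, some key)
    else (st.1.modify st.2 [] (· ++ [key]), st.2)
  else st

def count_share_admins_alt (output : String) : Int :=
  let st := ((PySem.Str.split? output "\n").getD []).foldl csaStepB (PySem.Dict.empty, none)
  (PySem.List.count (st.1.getD (some "Share Administrators") []) "User" : Int)

-- ===== PRECONDITION & SPEC =====
def Spec_count_share_admins (output : String) (out : Int) : Prop := out = count_share_admins_alt output
instance (output : String) (out : Int) : Decidable (Spec_count_share_admins output out) := by unfold Spec_count_share_admins; infer_instance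

-- ===== CLAIM (what is proved, stated in full; the proofs are below) =====
def Claim_equal_count_share_admins : Prop := ∀ (output : String), Dom_count_share_admins output → Spec_count_share_admins output (count_share_admins output)

-- ===== LEMMAS AND PROOFS =====

/-- The count B reads off a table state. -/
def csaCB (d : PySem.Dict (Option String) (List String)) : Int :=
  (PySem.List.count (d.getD (some "Share Administrators") []) "User" : Int)

theorem csaCB_modify (d : PySem.Dict (Option String) (List String)) (section_ : Option String)
    (key : String) :
    csaCB (d.modify section_ [] (· ++ [key]))
      = csaCB d + (if section_ = some "Share Administrators" ∧ key = "User" then 1 else 0) := by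
  unfold csaCB
  rw [PySem.Dict.getD_modify]
  by_cases hsec : (some "Share Administrators" : Option String) = section_
  · rw [if_pos hsec]
    by_cases hu : key = "User"
    · simp [PySem.List.count, hu, ← hsec]
    · simp [PySem.List.count, hu, ← hsec]
  · have hno : ¬ (section_ = some "Share Administrators" ∧ key = "User") := by
      rintro ⟨h1, _⟩; exact hsec h1.symm
    rw [if_neg hsec, if_neg hno]
    omega

/-- Loop invariant: A's counter advances exactly as much as the 'User' count of B's
'Share Administrators' bucket grows, provided the boolean tracks the current section. -/
theorem csa_invariant (lines : List String) (count : Int) (inSA : Bool)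
    (d : PySem.Dict (Option String) (List String)) (section_ : Option String)
    (h : inSA = (section_ == some "Share Administrators")) :
    (lines.foldl csaStepA (count, inSA)).1 - count
      = csaCB (lines.foldl csaStepB (d, section_)).1 - csaCB d := by
  induction lines generalizing count inSA d section_ with
  | nil => simp
  | cons line rest ih =>
    simp only [List.foldl_cons]
    by_cases hc : PySem.Chars.isIn [':'] (PySem.Chars.strip line.toList) = true
    · by_cases hsa : csaKey line = "Share Administrators"
      · have hA : csaStepA (count, inSA) line = (count, true) := by
          simp [csaStepA, hc, hsa]
        have hB : csaStepB (d, section_) line = (d, some (csaKey line)) := by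
          simp [csaStepB, hc, hsa, folderSectionHeaders]
        rw [hA, hB, ih count true d (some (csaKey line)) (by simp [hsa])]
      · by_cases hhdr : csaKey line ∈ folderSectionHeaders
        · have hA : csaStepA (count, inSA) line = (count, false) := by
            simp [csaStepA, hc, hsa, hhdr]
          have hB : csaStepB (d, section_) line = (d, some (csaKey line)) := by
            simp [csaStepB, hc, hhdr]
          rw [hA, hB, ih count false d (some (csaKey line)) (by simp [hsa])]
        · have hB : csaStepB (d, section_) line
              = (d.modify section_ [] (· ++ [csaKey line]), section_) := by
            simp [csaStepB, hc, hhdr]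
          have hCB := csaCB_modify d section_ (csaKey line)
          by_cases hact : inSA = true ∧ csaKey line = "User"
          · obtain ⟨hin, hu⟩ := hact
            have hA : csaStepA (count, inSA) line = (count + 1, inSA) := by
              simp [csaStepA, hc, hin, hu, folderSectionHeaders]
            have hsec : section_ = some "Share Administrators" := by
              rw [h] at hin; simpa using hin
            have h1 := ih (count + 1) inSA (d.modify section_ [] (· ++ [csaKey line])) section_ h
            rw [hA, hB]
            rw [if_pos ⟨hsec, hu⟩] at hCB
            linarith [h1]
          · have hA : csaStepA (count, inSA) line = (count, inSA) := by
              by_cases hin : inSA = true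
              · have hu : ¬ csaKey line = "User" := fun hu => hact ⟨hin, hu⟩
                simp [csaStepA, hc, hsa, hhdr, hin, hu]
              · simp [csaStepA, hc, hsa, hhdr, Bool.eq_false_iff.mpr hin]
            have hno : ¬ (section_ = some "Share Administrators" ∧ csaKey line = "User") := by
              rintro ⟨h1, h2⟩
              exact hact ⟨by simp [h, h1], h2⟩
            have h1 := ih count inSA (d.modify section_ [] (· ++ [csaKey line])) section_ h
            rw [hA, hB]
            rw [if_neg hno] at hCB
            linarith [h1]
    · have hA : csaStepA (count, inSA) line = (count, inSA) := by
        simp [csaStepA, hc]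
      have hB : csaStepB (d, section_) line = (d, section_) := by
        simp [csaStepB, hc]
      rw [hA, hB, ih count inSA d section_ h]

-- ===== VERDICT (by name: the statement is the Claim_ definition above) =====
theorem count_share_admins_spec : Claim_equal_count_share_admins := by
  intro output _
  unfold Spec_count_share_admins count_share_admins count_share_admins_alt
  have hinv := csa_invariant ((PySem.Str.split? output "\n").getD []) 0 false
      PySem.Dict.empty none (by simp)
  have h0 : csaCB PySem.Dict.empty = 0 := rfl
  simp only [csaCB] at hinv h0
  simp only []
  omega
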